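-- pv_equiv track=rewrite | github.com/Snex-Thadeus/Data-Structures-and-Algorithms | Codility/NumberSolitaire.py | solution
-- ===== SOURCE A (Python) =====
-- import math
--
-- def solution(A):
--     # write your code in Python 3.6
--     lenA = len(A)
--     if lenA == 0:
--         return 0
--
--     dp = [0] * lenA
--     dp[0] = A[0]
--     for i in range(1, lenA):
--         j = i - 1
--         maxBefore = -math.inf
--         # check for the max value that can be achived using the current element and any of the last six positions
--         while j >= 0 and j >= i - 6:
--             maxBefore = max(maxBefore, dp[j] + A[i])
--             j -= 1
--         dp[i] = maxBefore
--     return dp[lenA - 1]  # return the max value that can be achieved where the last position is included (lenA-1)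
-- ===== SOURCE B (Python) =====
-- def solution(A):
--     # Monotonic-deque sliding-window max: O(1) amortised per element, no dp array.
--     n = len(A)
--     if n == 0:
--         return 0
--     dq = [(0, A[0])]  # (index, score) with scores strictly decreasing front-to-back
--     cur = A[0]
--     for i in range(1, n):
--         while dq[0][0] < i - 6:
--             dq.pop(0)
--         cur = dq[0][1] + A[i]
--         while dq and dq[-1][1] <= cur:
--             dq.pop()
--         dq.append((i, cur))
--     return cur
-- ===== Notes on version B (the rewrite author's own statement) =====
-- stated objective: faster
-- what changed: Replaces A's per-position backward max-scan over a dp array with a monotonic deque of (index, score) pairs: the window maximum is read off the deque front in amortised O(1) per position, and no dp array is kept at all.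
import Mathlib
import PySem

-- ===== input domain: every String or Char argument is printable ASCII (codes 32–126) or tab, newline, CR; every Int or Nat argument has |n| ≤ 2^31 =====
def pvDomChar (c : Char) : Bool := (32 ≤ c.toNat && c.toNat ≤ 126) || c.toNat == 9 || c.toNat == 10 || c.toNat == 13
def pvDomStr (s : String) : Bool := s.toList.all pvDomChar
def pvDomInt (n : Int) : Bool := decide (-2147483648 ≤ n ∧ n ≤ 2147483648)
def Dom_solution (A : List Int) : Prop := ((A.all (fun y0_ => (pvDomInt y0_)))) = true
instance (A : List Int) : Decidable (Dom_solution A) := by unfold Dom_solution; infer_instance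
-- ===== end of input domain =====

-- B replaces A's per-position backward max-scan over a dp array by a monotonic deque of
-- (index, score) pairs, keeping no dp array at all (objective: alternative decomposition).

-- ===== PORT A =====
-- max(maxBefore, x) where maxBefore starts as -math.inf: 'none' plays -inf
def pvMaxOpt : Option Int → Int → Option Int
  | none, x => some x
  | some m, x => some (max m x)

-- 'while j >= 0 and j >= i - 6: maxBefore = max(maxBefore, dp[j] + A[i]); j -= 1'
def pvAWhile (dp : List Int) (Ai : Int) (i j : Int) (acc : Option Int) : Option Int :=
  if _h : 0 ≤ j ∧ i - 6 ≤ j then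
    pvAWhile dp Ai i (j - 1) (pvMaxOpt acc (PySem.List.pyGetD dp j 0 + Ai))
  else acc
termination_by (j + 1).toNat
decreasing_by omega

def solution (A : List Int) : Int :=
  let lenA : Int := PySem.List.len A
  if lenA == 0 then 0
  else
    let dp : List Int := List.replicate A.length 0          -- [0] * lenA
    let dp := PySem.List.pySetD dp 0 (PySem.List.pyGetD A 0 0)
    -- for i ≥ 1 the while body runs at least once, so maxBefore is never the initial -inf
    -- and '.getD 0' below is never taken
    let dp := (PySem.List.pyRange 1 lenA 1).foldl (fun dp i =>
      PySem.List.pySetD dp i ((pvAWhile dp (PySem.List.pyGetD A i 0) i (i - 1) none).getD 0)) dp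
    PySem.List.pyGetD dp (lenA - 1) 0

-- ===== PORT B =====
-- 'while dq[0][0] < i - 6: dq.pop(0)'  (pop-from-front while ≡ dropWhile; dq is never
-- emptied here since its last index is i-1 ≥ i-6, so Python's dq[0] never raises)
def pvEvict (bound : Int) (dq : List (Int × Int)) : List (Int × Int) :=
  dq.dropWhile (fun p => p.1 < bound)

-- 'while dq and dq[-1][1] <= cur: dq.pop()'  (pop-from-back while ≡ dropWhile on the reverse)
def pvPopBack (cur : Int) (dq : List (Int × Int)) : List (Int × Int) :=
  (dq.reverse.dropWhile (fun p => p.2 ≤ cur)).reverse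

def pvStep (A : List Int) (st : List (Int × Int) × Int) (i : Int) : List (Int × Int) × Int :=
  let dq := pvEvict (i - 6) st.1
  let cur := (dq.headD (0, 0)).2 + PySem.List.pyGetD A i 0   -- dq[0][1] + A[i]; dq ≠ [] here
  (pvPopBack cur dq ++ [(i, cur)], cur)

def solution_alt (A : List Int) : Int :=
  let n : Int := PySem.List.len A
  if n == 0 then 0
  else
    let a0 := PySem.List.pyGetD A 0 0
    ((PySem.List.pyRange 1 n 1).foldl (pvStep A) ([(0, a0)], a0)).2

-- ===== PRECONDITION & SPEC =====
def Spec_solution (A : List Int) (out : Int) : Prop := out = solution_alt A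
instance (A : List Int) (out : Int) : Decidable (Spec_solution A out) := by unfold Spec_solution; infer_instance

-- ===== CLAIM (what is proved, stated in full; the proofs are below) =====
def Claim_equal_solution : Prop := ∀ (A : List Int), Dom_solution A → Spec_solution A (solution A)

-- ===== LEMMAS AND PROOFS =====

-- max of a nonempty list (0 for [], never used on [])
def pvMaxNe : List Int → Int
  | [] => 0
  | x :: xs => xs.foldl max x

-- reference dp values, most recent first: pvDpl A n = [dp n, dp (n-1), ..., dp 0]
def pvDpl (A : List Int) : Nat → List Int
  | 0 => [PySem.List.pyGetD A 0 0]
  | n + 1 => (pvMaxNe ((pvDpl A n).take 6) + PySem.List.pyGetD A ((n : Int) + 1) 0) :: pvDpl A n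

def pvDpv (A : List Int) (n : Nat) : Int := (pvDpl A n).headI

theorem pvDpl_eq_map (A : List Int) (n : Nat) :
    pvDpl A n = (List.range (n + 1)).map (fun k => pvDpv A (n - k)) := by
  induction n with
  | zero => simp [pvDpl, pvDpv, List.range_succ, pvDpl]
  | succ n ih =>
    rw [List.range_succ_eq_map, List.map_cons, List.map_map]
    show pvDpl A (n+1) = pvDpv A (n+1) :: _
    conv_lhs => rw [show pvDpl A (n+1) = pvDpv A (n+1) :: pvDpl A n from rfl]
    congr 1
    rw [ih]
    apply List.map_congr_left
    intro k _
    simp [Function.comp]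

theorem le_pvMaxNe {l : List Int} {x : Int} (hx : x ∈ l) : x ≤ pvMaxNe l := by
  cases l with
  | nil => simp at hx
  | cons y ys =>
    rcases List.mem_cons.1 hx with rfl | h
    · exact (PySem.List.le_foldl_max ys x).1
    · exact (PySem.List.le_foldl_max ys y).2 x h

theorem pvMaxNe_mem {l : List Int} (h : l ≠ []) : pvMaxNe l ∈ l := by
  cases l with
  | nil => simp at h
  | cons y ys =>
    rcases PySem.List.foldl_max_mem ys y with h1 | h1
    · rw [pvMaxNe, h1]; exact List.mem_cons_self
    · exact List.mem_cons_of_mem _ h1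

theorem foldl_max_add (c : Int) : ∀ (l : List Int) (v : Int),
    l.foldl (fun a x => max a (x + c)) (v + c) = (l.foldl max v) + c := by
  intro l
  induction l with
  | nil => intro v; rfl
  | cons w ws ih =>
    intro v
    show ws.foldl _ (max (v + c) (w + c)) = _
    rw [show max (v + c) (w + c) = (max v w) + c by omega, ih]
    rfl

theorem foldl_pvMaxOpt_some (Ai : Int) : ∀ (l : List Int) (m : Int),
    l.foldl (fun a v => pvMaxOpt a (v + Ai)) (some m)
      = some (l.foldl (fun a v => max a (v + Ai)) m) := by
  intro l
  induction l with
  | nil => intro m; rfl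
  | cons w ws ih => intro m; exact ih (max m (w + Ai))

theorem foldl_pvMaxOpt (Ai : Int) (l : List Int) (h : l ≠ []) :
    l.foldl (fun a v => pvMaxOpt a (v + Ai)) none = some (pvMaxNe l + Ai) := by
  cases l with
  | nil => simp at h
  | cons v vs =>
    show vs.foldl _ (pvMaxOpt none (v + Ai)) = _
    rw [show pvMaxOpt none (v + Ai) = some (v + Ai) from rfl, foldl_pvMaxOpt_some,
      foldl_max_add, pvMaxNe]

theorem pvAWhile_eq_foldl (dp : List Int) (Ai i : Int) : ∀ (j : Int) (acc : Option Int),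
    pvAWhile dp Ai i j acc =
      ((PySem.List.pyRange j (max 0 (i - 6) - 1) (-1)).map
        (fun t => PySem.List.pyGetD dp t 0)).foldl (fun a v => pvMaxOpt a (v + Ai)) acc := by
  intro j
  induction hn : (j + 1).toNat using Nat.strong_induction_on generalizing j with
  | _ n ih =>
  intro acc
  by_cases h : 0 ≤ j ∧ i - 6 ≤ j
  · rw [pvAWhile, dif_pos h, ih (j - 1 + 1).toNat (by omega) (j - 1) rfl,
      PySem.List.pyRange_neg_one_cons (by omega : max 0 (i - 6) - 1 < j), List.map_cons,
      List.foldl_cons]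
  · rw [pvAWhile, dif_neg h, PySem.List.pyRange_neg_one_eq_nil (by omega : j ≤ max 0 (i - 6) - 1)]
    rfl

theorem pvWindow_eq (A : List Int) (dp : List Int) (m : Nat) (hm : 1 ≤ m)
    (hget : ∀ j : Nat, j < m → dp.getD j 0 = pvDpv A j) :
    (PySem.List.pyRange ((m : Int) - 1) (max 0 ((m : Int) - 6) - 1) (-1)).map
      (fun t => PySem.List.pyGetD dp t 0) = (pvDpl A (m - 1)).take 6 := by
  rw [PySem.List.pyRange_neg_one, List.map_map, pvDpl_eq_map, ← List.map_take, List.take_range]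
  rw [show ((m : Int) - 1 - (max 0 ((m : Int) - 6) - 1)).toNat = min 6 m by omega]
  rw [show m - 1 + 1 = m by omega]
  apply List.map_congr_left
  intro k hk
  rw [List.mem_range] at hk
  have h1 : ((m : Int) - 1 - (k : Int)) = ((m - 1 - k : Nat) : Int) := by omega
  simp only [Function.comp, h1, PySem.List.pyGetD_natCast]
  exact hget _ (by omega)

theorem getD_set_self (l : List Int) (m : Nat) (v : Int) (h : m < l.length) :
    (l.set m v).getD m 0 = v := by
  simp [List.getD_eq_getElem?_getD, h]
theorem getD_set_ne (l : List Int) (m j : Nat) (v : Int) (h : j ≠ m) :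
    (l.set m v).getD j 0 = l.getD j 0 := by
  simp [List.getD_eq_getElem?_getD, Ne.symm h]

-- ===== A side =====

theorem pvDpl_ne_nil (A : List Int) (n : Nat) : pvDpl A n ≠ [] := by
  cases n <;> simp [pvDpl]

theorem pvDpl_take_ne_nil (A : List Int) (n : Nat) : (pvDpl A n).take 6 ≠ [] := by
  have := pvDpl_ne_nil A n
  cases h : pvDpl A n with
  | nil => exact absurd h this
  | cons x xs => simp

theorem pvDpv_succ' (A : List Int) (m : Nat) (hm : 1 ≤ m) :
    pvDpv A m = pvMaxNe ((pvDpl A (m - 1)).take 6) + PySem.List.pyGetD A (m : Int) 0 := by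
  obtain ⟨n, rfl⟩ : ∃ n, m = n + 1 := ⟨m - 1, by omega⟩
  show (pvDpl A (n+1)).headI = _
  rw [pvDpl]
  simp only [List.headI]
  norm_num

def pvAInv (A : List Int) (m : Nat) (dp : List Int) : Prop :=
  dp.length = A.length ∧ ∀ j : Nat, j < m → dp.getD j 0 = pvDpv A j

theorem pvA_step (A : List Int) (dp : List Int) (m : Nat) (hm : 1 ≤ m) (hmn : m < A.length)
    (hinv : pvAInv A m dp) :
    pvAInv A (m + 1)
      (PySem.List.pySetD dp (m : Int)
        ((pvAWhile dp (PySem.List.pyGetD A (m : Int) 0) (m : Int) ((m : Int) - 1) none).getD 0)) := by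
  obtain ⟨hlen, hget⟩ := hinv
  have hw : pvAWhile dp (PySem.List.pyGetD A (m : Int) 0) (m : Int) ((m : Int) - 1) none
      = some (pvDpv A m) := by
    rw [pvAWhile_eq_foldl, pvWindow_eq A dp m hm hget,
      foldl_pvMaxOpt _ _ (pvDpl_take_ne_nil A (m - 1)), ← pvDpv_succ' A m hm]
  rw [hw, Option.getD_some, PySem.List.pySetD_natCast]
  refine ⟨by simpa using hlen, ?_⟩
  intro j hj
  by_cases hjm : j = m
  · subst hjm
    exact getD_set_self dp j _ (by omega)
  · rw [getD_set_ne dp m j _ hjm]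
    exact hget j (by omega)

theorem pvA_fold (A : List Int) (m : Nat) (hm : 1 ≤ m) (hmn : m ≤ A.length) :
    pvAInv A m
      ((PySem.List.pyRange 1 (m : Int) 1).foldl (fun dp i =>
        PySem.List.pySetD dp i ((pvAWhile dp (PySem.List.pyGetD A i 0) i (i - 1) none).getD 0))
        (PySem.List.pySetD (List.replicate A.length 0) 0 (PySem.List.pyGetD A 0 0))) := by
  induction m with
  | zero => omega
  | succ m ih =>
    by_cases hm1 : m = 0
    · subst hm1
      rw [show ((0 : Nat) + 1 : Nat) = 1 from rfl]
      rw [show ((1 : Nat) : Int) = 1 from rfl, PySem.List.pyRange_one_eq_nil (by omega)]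
      simp only [List.foldl_nil]
      constructor
      · simpa using rfl
      · intro j hj
        rw [show j = 0 by omega]
        rw [show PySem.List.pySetD (List.replicate A.length 0) 0 (PySem.List.pyGetD A 0 0)
            = (List.replicate A.length 0).set 0 (PySem.List.pyGetD A 0 0) by
          simpa using PySem.List.pySetD_natCast (List.replicate A.length 0) 0 _]
        rw [getD_set_self _ _ _ (by simp; omega)]
        rfl
    · have hm' : 1 ≤ m := by omega
      rw [show ((m + 1 : Nat) : Int) = (m : Int) + 1 by push_cast; ring,
        PySem.List.pyRange_one_succ_right (by omega), List.foldl_append, List.foldl_cons,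
        List.foldl_nil]
      exact pvA_step A _ m hm' (by omega) (ih hm' (by omega))

-- ===== B side =====

theorem pvDpv_mem_take (A : List Int) (i t : Nat) (ht : t < min 6 (i + 1)) :
    pvDpv A (i - t) ∈ (pvDpl A i).take 6 := by
  rw [pvDpl_eq_map, ← List.map_take, List.take_range]
  exact List.mem_map_of_mem (by rw [List.mem_range]; omega)

theorem take_mem_form (A : List Int) (i : Nat) {x : Int} (hx : x ∈ (pvDpl A i).take 6) :
    ∃ t, t < min 6 (i + 1) ∧ x = pvDpv A (i - t) := by
  rw [pvDpl_eq_map, ← List.map_take, List.take_range] at hx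
  obtain ⟨t, ht, rfl⟩ := List.mem_map.1 hx
  exact ⟨t, by rw [List.mem_range] at ht; omega, rfl⟩

theorem mem_dropWhile_of_not {α : Type} (p : α → Bool) {l : List α} {x : α}
    (hx : x ∈ l) (hp : ¬ p x = true) : x ∈ l.dropWhile p := by
  have h := List.takeWhile_append_dropWhile (p := p) (l := l)
  rw [← h] at hx
  rcases List.mem_append.1 hx with h1 | h1
  · exact absurd (List.mem_takeWhile_imp h1) hp
  · exact h1

theorem pairwise_head_dom {α : Type} {R : α → α → Prop} {l : List α}
    (hp : l.Pairwise R) (h : l ≠ []) {x : α} (hx : x ∈ l) : x = l.head h ∨ R (l.head h) x := by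
  cases l with
  | nil => exact absurd rfl h
  | cons a tl =>
    rcases List.mem_cons.1 hx with rfl | hx'
    · exact Or.inl rfl
    · exact Or.inr ((List.pairwise_cons.1 hp).1 x hx')

theorem popBack_subset {cur : Int} {l : List (Int × Int)} {x : Int × Int}
    (hx : x ∈ pvPopBack cur l) : x ∈ l := by
  rw [pvPopBack, List.mem_reverse] at hx
  have := (List.dropWhile_sublist _).subset hx
  rwa [List.mem_reverse] at this

theorem mem_popBack_of_not {cur : Int} {l : List (Int × Int)} {x : Int × Int}
    (hx : x ∈ l) (h : ¬ x.2 ≤ cur) : x ∈ pvPopBack cur l := by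
  rw [pvPopBack, List.mem_reverse]
  exact mem_dropWhile_of_not _ (List.mem_reverse.2 hx) (by simpa using h)

theorem pairwise_popBack {R : Int × Int → Int × Int → Prop} {cur : Int} {l : List (Int × Int)}
    (hp : l.Pairwise R) : (pvPopBack cur l).Pairwise R := by
  rw [pvPopBack, List.pairwise_reverse]
  exact ((List.pairwise_reverse.2 hp).sublist (List.dropWhile_sublist _))

theorem mem_popBack_gt {cur : Int} {l : List (Int × Int)}
    (hp : l.Pairwise (fun p q => p.1 < q.1 ∧ q.2 < p.2)) {x : Int × Int}
    (hx : x ∈ pvPopBack cur l) : cur < x.2 := by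
  rw [pvPopBack, List.mem_reverse] at hx
  have hdw : l.reverse.dropWhile (fun p => decide (p.2 ≤ cur)) ≠ [] :=
    List.ne_nil_of_mem hx
  have hpair : (l.reverse.dropWhile (fun p => decide (p.2 ≤ cur))).Pairwise
      (fun p q : Int × Int => q.1 < p.1 ∧ p.2 < q.2) :=
    (List.pairwise_reverse.2 hp).sublist (List.dropWhile_sublist _)
  have hhead := List.head_dropWhile_not (fun p : Int × Int => decide (p.2 ≤ cur)) hdw
  simp only [decide_eq_false_iff_not, not_le] at hhead
  rcases pairwise_head_dom hpair hdw hx with rfl | hrel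
  · exact hhead
  · exact lt_trans hhead hrel.2

def pvBInv (A : List Int) (i : Nat) (dq : List (Int × Int)) : Prop :=
  (∃ h : dq ≠ [], (dq.getLast h).1 = (i : Int)) ∧
  dq.Pairwise (fun p q => p.1 < q.1 ∧ q.2 < p.2) ∧
  (∀ p ∈ dq, 0 ≤ p.1 ∧ p.1 ≤ (i : Int) ∧ p.2 = pvDpv A p.1.toNat) ∧
  (∀ j : Nat, j ≤ i → i ≤ j + 6 → ∃ p ∈ dq, (j : Int) ≤ p.1 ∧ pvDpv A j ≤ p.2)

theorem getLast_append_singleton {α : Type} (l : List α) (x : α) (h : l ++ [x] ≠ []) :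
    (l ++ [x]).getLast h = x := by simp

theorem pvB_step (A : List Int) (i : Nat) (dq : List (Int × Int)) (c : Int)
    (hinv : pvBInv A i dq) :
    (pvStep A (dq, c) ((i : Int) + 1)).2 = pvDpv A (i + 1) ∧
      pvBInv A (i + 1) (pvStep A (dq, c) ((i : Int) + 1)).1 := by
  obtain ⟨⟨hne, hlast⟩, hpair, hmem, hcov⟩ := hinv
  set bound : Int := (i : Int) + 1 - 6 with hbound
  set dq₁ : List (Int × Int) := dq.dropWhile (fun p => decide (p.1 < bound)) with hdq₁
  have hev : pvEvict bound dq = dq₁ := rfl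
  -- dq₁ is nonempty: the last element of dq has index i ≥ bound
  have h1ne : dq₁ ≠ [] := by
    rw [hdq₁, Ne, List.dropWhile_eq_nil_iff]
    intro hall
    have := hall _ (List.getLast_mem hne)
    rw [hlast] at this
    simp at this; omega
  have hsub₁ : ∀ x ∈ dq₁, x ∈ dq := fun x hx => (List.dropWhile_sublist _).subset hx
  have hpair₁ : dq₁.Pairwise (fun p q => p.1 < q.1 ∧ q.2 < p.2) :=
    hpair.sublist (List.dropWhile_sublist _)
  set hd : Int × Int := dq₁.head h1ne with hhd
  have hd_mem₁ : hd ∈ dq₁ := List.head_mem h1ne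
  have hd_mem : hd ∈ dq := hsub₁ _ hd_mem₁
  have hd_ge : ¬ hd.1 < bound := by
    have h3 := List.head_dropWhile_not (fun p : Int × Int => decide (p.1 < bound)) (hdq₁ ▸ h1ne)
    rw [hhd] at *
    simp only [hdq₁] at h3 ⊢
    simpa using h3
  obtain ⟨hd0, hdle, hdval⟩ := hmem hd hd_mem
  -- the head of the evicted deque is the max of the 6-window
  have hdmax : hd.2 = pvMaxNe ((pvDpl A i).take 6) := by
    apply le_antisymm
    · have : pvDpv A (i - (i - hd.1.toNat)) ∈ (pvDpl A i).take 6 :=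
        pvDpv_mem_take A i (i - hd.1.toNat) (by omega)
      have h2 : i - (i - hd.1.toNat) = hd.1.toNat := by omega
      rw [h2] at this
      rw [hdval]
      exact le_pvMaxNe this
    · obtain ⟨t, ht, heq⟩ := take_mem_form A i (pvMaxNe_mem (pvDpl_take_ne_nil A i))
      obtain ⟨p, hpdq, hple, hpval⟩ := hcov (i - t) (by omega) (by omega)
      have hpb : ¬ (p.1 < bound) := by omega
      have hp₁ : p ∈ dq₁ := mem_dropWhile_of_not _ hpdq (by simpa using hpb)
      have hdom : p.2 ≤ hd.2 := by
        rcases pairwise_head_dom hpair₁ h1ne (x := p) hp₁ with h | h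
        · rw [h, ← hhd]
        · rw [← hhd] at h; omega
      calc pvMaxNe ((pvDpl A i).take 6) = pvDpv A (i - t) := heq
        _ ≤ p.2 := hpval
        _ ≤ hd.2 := hdom
  have hheadD : dq₁.headD (0, 0) = hd := by
    cases h : dq₁ with
    | nil => exact absurd h h1ne
    | cons a tl => rw [hhd]; simp [h]
  have hcurval : hd.2 + PySem.List.pyGetD A ((i : Int) + 1) 0 = pvDpv A (i + 1) := by
    rw [hdmax]; rfl
  simp only [pvStep, ← hbound, hev, hheadD]
  refine ⟨hcurval, ?_, ?_, ?_, ?_⟩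
  · refine ⟨by simp, ?_⟩
    rw [getLast_append_singleton]
    push_cast
    ring
  · rw [List.pairwise_append]
    refine ⟨pairwise_popBack hpair₁, by simp, ?_⟩
    intro p hp q hq
    rw [List.mem_singleton] at hq
    subst hq
    have hpd := hmem p (hsub₁ p (popBack_subset hp))
    constructor
    · have : p.1 ≤ (i : Int) := hpd.2.1
      simp only []
      omega
    · exact mem_popBack_gt hpair₁ hp
  · intro p hp
    rcases List.mem_append.1 hp with h | h
    · obtain ⟨h0, hle, hval⟩ := hmem p (hsub₁ p (popBack_subset h))
      exact ⟨h0, by push_cast; omega, hval⟩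
    · rw [List.mem_singleton] at h
      subst h
      refine ⟨by positivity, by push_cast; omega, ?_⟩
      show hd.2 + _ = pvDpv A (((i : Int) + 1).toNat)
      rw [show ((i : Int) + 1).toNat = i + 1 from by omega]
      exact hcurval
  · intro j hj hj6
    by_cases hcase : pvDpv A j ≤ hd.2 + PySem.List.pyGetD A ((i : Int) + 1) 0
    · refine ⟨((i : Int) + 1, hd.2 + PySem.List.pyGetD A ((i : Int) + 1) 0), by simp, ?_, hcase⟩
      push_cast; omega
    · have hji : j ≤ i := by
        rcases Nat.lt_or_ge j (i + 1) with h | h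
        · omega
        · exfalso; apply hcase
          rw [show j = i + 1 by omega, hcurval]
      obtain ⟨p, hpdq, hple, hpval⟩ := hcov j hji (by omega)
      have hpb : ¬ (p.1 < bound) := by omega
      have hp₁ : p ∈ dq₁ := mem_dropWhile_of_not _ hpdq (by simpa using hpb)
      have hpgt : ¬ p.2 ≤ hd.2 + PySem.List.pyGetD A ((i : Int) + 1) 0 := by omega
      exact ⟨p, List.mem_append_left _ (mem_popBack_of_not hp₁ hpgt), hple, hpval⟩

theorem pvB_fold (A : List Int) (m : Nat) (hm : 1 ≤ m) :
    (((PySem.List.pyRange 1 (m : Int) 1).foldl (pvStep A)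
        ([(0, PySem.List.pyGetD A 0 0)], PySem.List.pyGetD A 0 0)).2 = pvDpv A (m - 1)) ∧
      pvBInv A (m - 1)
        (((PySem.List.pyRange 1 (m : Int) 1).foldl (pvStep A)
          ([(0, PySem.List.pyGetD A 0 0)], PySem.List.pyGetD A 0 0)).1) := by
  induction m with
  | zero => omega
  | succ m ih =>
    by_cases hm1 : m = 0
    · subst hm1
      rw [show ((0 + 1 : Nat) : Int) = 1 from rfl, PySem.List.pyRange_one_eq_nil (by omega)]
      simp only [List.foldl_nil]
      refine ⟨rfl, ⟨by simp, rfl⟩, by simp, ?_, ?_⟩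
      · intro p hp
        rw [List.mem_singleton] at hp
        subst hp
        exact ⟨le_refl 0, by simp, rfl⟩
      · intro j hj hj6
        rw [Nat.le_zero] at hj
        subst hj
        exact ⟨(0, PySem.List.pyGetD A 0 0), List.mem_singleton_self _, by simp, le_refl _⟩
    · have hm' : 1 ≤ m := by omega
      obtain ⟨ih2, ihinv⟩ := ih hm'
      rw [show ((m + 1 : Nat) : Int) = (m : Int) + 1 by push_cast; ring,
        PySem.List.pyRange_one_succ_right (by omega), List.foldl_append, List.foldl_cons,
        List.foldl_nil]
      set st := (PySem.List.pyRange 1 (m : Int) 1).foldl (pvStep A)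
        ([(0, PySem.List.pyGetD A 0 0)], PySem.List.pyGetD A 0 0) with hst
      have hmi : (m : Int) = ((m - 1 : Nat) : Int) + 1 := by push_cast; omega
      have := pvB_step A (m - 1) st.1 st.2 ihinv
      rw [← hmi] at this
      rw [show (st.1, st.2) = st from rfl] at this
      rw [show m - 1 + 1 = m by omega] at this
      simpa using this

-- ===== VERDICT (by name: the statement is the Claim_ definition above) =====
theorem solution_spec : Claim_equal_solution := by
  intro A _
  unfold Spec_solution
  by_cases hA : A.length = 0
  · rw [List.length_eq_zero_iff] at hA
    subst hA
    rfl
  · have hn : 1 ≤ A.length := by omega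
    obtain ⟨hlen, hget⟩ := pvA_fold A A.length hn (le_refl _)
    have hBfold := pvB_fold A A.length hn
    simp only [solution, solution_alt, PySem.List.len_eq]
    rw [if_neg (by simpa using hA), if_neg (by simpa using hA)]
    rw [hBfold.1]
    rw [show (A.length : Int) - 1 = ((A.length - 1 : Nat) : Int) by push_cast; omega,
      PySem.List.pyGetD_natCast]
    exact hget (A.length - 1) (by omega)
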